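-- pv_equiv track=rewrite | github.com/Bhuvansh-Goyal-IITB/edp_test | shaping_bdf.py | pixels_to_hex
-- ===== SOURCE A (Python) =====
-- def pixels_to_hex(pixels, width):
--     hex_str = ""
--     for i in range(0, width, 8):
--         byte = 0
--         for bit in range(8):
--             if i + bit < width and pixels[i + bit]:
--                 byte |= 1 << (7 - bit)
--         hex_str += f"{byte:02X}"
--     return hex_str
-- ===== SOURCE B (Python) =====
-- def pixels_to_hex(pixels, width):
--     bits = "".join("1" if pixels[i] else "0" for i in range(width))
--     bits += "0" * (-len(bits) % 8)
--     return "".join(f"{int(bits[k:k+8], 2):02X}" for k in range(0, len(bits), 8))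
-- ===== Notes on version B (the rewrite author's own statement) =====
-- stated objective: alternative
-- what changed: replaces A's nested bit-shift OR-accumulation loops by a two-phase decomposition: build a '0'/'1' bit string over range(width), pad it to a byte boundary, then slice it into 8-char chunks parsed with int(chunk, 2)
import Mathlib
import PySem

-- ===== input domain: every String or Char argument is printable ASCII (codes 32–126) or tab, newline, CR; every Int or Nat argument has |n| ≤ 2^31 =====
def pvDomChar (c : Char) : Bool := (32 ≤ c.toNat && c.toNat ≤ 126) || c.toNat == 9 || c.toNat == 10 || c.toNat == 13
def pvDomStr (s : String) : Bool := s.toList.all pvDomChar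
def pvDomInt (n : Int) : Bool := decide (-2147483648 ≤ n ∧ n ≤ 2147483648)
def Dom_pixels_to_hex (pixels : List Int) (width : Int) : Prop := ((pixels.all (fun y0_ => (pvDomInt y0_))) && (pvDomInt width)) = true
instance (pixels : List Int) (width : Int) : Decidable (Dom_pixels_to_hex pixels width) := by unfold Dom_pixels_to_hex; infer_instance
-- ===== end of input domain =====

-- B replaces A's nested bit-shift OR-accumulation by a two-phase decomposition: build a '0'/'1'
-- bit string, pad it to a byte boundary, then parse 8-char chunks with int(chunk, 2) (objective:
-- alternative decomposition, same cost).

-- f"{b:02X}" for 0 ≤ b ≤ 255 (the only values either program formats): two uppercase hex digits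
def pvHexDigit (n : Nat) : Char := if n < 10 then Char.ofNat (48 + n) else Char.ofNat (55 + n)
def pvFmt02X (b : Int) : List Char := [pvHexDigit (b.toNat / 16), pvHexDigit (b.toNat % 16)]

-- ===== PORT A =====
def pixels_to_hex (pixels : List Int) (width : Int) : String :=
  String.ofList <| (PySem.List.pyRange 0 width 8).foldl (fun hex_str i =>
    hex_str ++ pvFmt02X ((PySem.List.pyRange 0 8 1).foldl (fun byte bit =>
      if i + bit < width ∧ PySem.List.pyGetD pixels (i + bit) 0 ≠ 0
      then PySem.Int.bor byte (1 <<< (7 - bit).toNat) else byte) 0)) []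

-- ===== PORT B =====
def pixels_to_hex_alt (pixels : List Int) (width : Int) : String :=
  let bits0 := (PySem.List.pyRange 0 width 1).map
      (fun i => if PySem.List.pyGetD pixels i 0 ≠ 0 then '1' else '0')
  let bits := bits0 ++ List.replicate (PySem.Int.mod (-(bits0.length : Int)) 8).toNat '0'
  String.ofList <| (PySem.List.pyRange 0 (bits.length : Int) 8).foldl (fun s k =>
    s ++ pvFmt02X ((PySem.Int.ofCharsBase?
      (PySem.List.slice bits (some k) (some (k + 8))) 2).getD 0)) []

-- ===== PRECONDITION & SPEC =====
-- A raises IndexError as soon as width exceeds len(pixels) (and so does B); Pre_ excludes exactly those inputs.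
def Pre_pixels_to_hex (pixels : List Int) (width : Int) : Prop := width ≤ (pixels.length : Int)
instance (pixels : List Int) (width : Int) : Decidable (Pre_pixels_to_hex pixels width) := by unfold Pre_pixels_to_hex; infer_instance
def pvWitness_pixels_to_hex : List Int × Int := ([1, 0, 1, 1, 0, 0, 1, 0, 1], 9)

def Spec_pixels_to_hex (pixels : List Int) (width : Int) (out : String) : Prop := out = pixels_to_hex_alt pixels width
instance (pixels : List Int) (width : Int) (out : String) : Decidable (Spec_pixels_to_hex pixels width out) := by unfold Spec_pixels_to_hex; infer_instance

-- ===== CLAIM (what is proved, stated in full; the proofs are below) =====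
def Claim_equal_pixels_to_hex : Prop := ∀ (pixels : List Int) (width : Int), Dom_pixels_to_hex pixels width → Pre_pixels_to_hex pixels width → Spec_pixels_to_hex pixels width (pixels_to_hex pixels width)

-- ===== LEMMAS AND PROOFS =====

-- the character B's padded bit string holds at absolute position t
def pvBitChar (pixels : List Int) (width : Int) (t : Nat) : Char :=
  if (t : Int) < width ∧ PySem.List.pyGetD pixels (t : Int) 0 ≠ 0 then '1' else '0'

-- boolean core of the per-chunk equality: A's OR-fold vs int('8 bits', 2), all 256 cases by kernel evaluation
set_option maxHeartbeats 2000000 in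
theorem pv_chunk_core (b0 b1 b2 b3 b4 b5 b6 b7 : Bool) :
    pvFmt02X (([((0:Int),b0),(1,b1),(2,b2),(3,b3),(4,b4),(5,b5),(6,b6),(7,b7)]).foldl
        (fun byte p => cond p.2 (PySem.Int.bor byte (1 <<< (7 - p.1).toNat)) byte) 0)
    = pvFmt02X ((PySem.Int.ofCharsBase? ([b0,b1,b2,b3,b4,b5,b6,b7].map (fun b => cond b '1' '0')) 2).getD 0) := by
  revert b0 b1 b2 b3 b4 b5 b6 b7
  decide

-- per-chunk: A's OR-accumulated byte formats like B's parsed 8-char chunk starting at position a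
set_option maxHeartbeats 1000000 in
theorem pv_chunk (pixels : List Int) (width : Int) (a : Nat) :
    pvFmt02X ((PySem.List.pyRange 0 8 1).foldl (fun byte bit =>
      if ((a : Int)) + bit < width ∧ PySem.List.pyGetD pixels (((a : Int)) + bit) 0 ≠ 0
      then PySem.Int.bor byte (1 <<< (7 - bit).toNat) else byte) 0)
    = pvFmt02X ((PySem.Int.ofCharsBase?
        [pvBitChar pixels width a, pvBitChar pixels width (a+1), pvBitChar pixels width (a+2),
         pvBitChar pixels width (a+3), pvBitChar pixels width (a+4), pvBitChar pixels width (a+5),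
         pvBitChar pixels width (a+6), pvBitChar pixels width (a+7)] 2).getD 0) := by
  have hr : PySem.List.pyRange 0 8 1 = [0,1,2,3,4,5,6,7] := by decide
  rw [hr]
  have core := pv_chunk_core
    (decide ((a:Int) + 0 < width ∧ PySem.List.pyGetD pixels ((a:Int) + 0) 0 ≠ 0))
    (decide ((a:Int) + 1 < width ∧ PySem.List.pyGetD pixels ((a:Int) + 1) 0 ≠ 0))
    (decide ((a:Int) + 2 < width ∧ PySem.List.pyGetD pixels ((a:Int) + 2) 0 ≠ 0))
    (decide ((a:Int) + 3 < width ∧ PySem.List.pyGetD pixels ((a:Int) + 3) 0 ≠ 0))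
    (decide ((a:Int) + 4 < width ∧ PySem.List.pyGetD pixels ((a:Int) + 4) 0 ≠ 0))
    (decide ((a:Int) + 5 < width ∧ PySem.List.pyGetD pixels ((a:Int) + 5) 0 ≠ 0))
    (decide ((a:Int) + 6 < width ∧ PySem.List.pyGetD pixels ((a:Int) + 6) 0 ≠ 0))
    (decide ((a:Int) + 7 < width ∧ PySem.List.pyGetD pixels ((a:Int) + 7) 0 ≠ 0))
  simp only [List.foldl, List.map, Bool.cond_decide] at core
  simp only [List.foldl, pvBitChar]
  push_cast
  simp only [add_zero] at core ⊢
  exact core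

-- B's padded bit list is pvBitChar sampled over range (8 * number of chunks)
theorem pv_bits_eq (pixels : List Int) (width : Int) (hw : 0 < width) :
    ((PySem.List.pyRange 0 width 1).map
        (fun i => if PySem.List.pyGetD pixels i 0 ≠ 0 then '1' else '0'))
      ++ List.replicate (PySem.Int.mod (-(width.toNat : Int)) 8).toNat '0'
    = (List.range (8 * ((width.toNat + 7) / 8))).map (pvBitChar pixels width) := by
  set n := width.toNat with hn
  set p := (PySem.Int.mod (-(n : Int)) 8).toNat with hpdef
  have hmod : PySem.Int.mod (-(n : Int)) 8 = (-(n : Int)) % 8 :=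
    PySem.Int.mod_eq_emod_of_pos (by norm_num)
  have hwn : width = (n : Int) := by omega
  have hsum : 8 * ((n + 7) / 8) = n + p := by
    have : (p : Int) = (-(n : Int)) % 8 := by
      rw [hpdef, hmod]
      have h0 : (0:Int) ≤ (-(n : Int)) % 8 := Int.emod_nonneg _ (by norm_num)
      omega
    omega
  rw [hsum, List.range_add, List.map_append]
  congr 1
  · rw [PySem.List.pyRange_one, List.map_map]
    have hlen : (width - 0).toNat = n := by omega
    rw [hlen]
    apply List.map_congr_left
    intro k hk
    have hk' : k < n := List.mem_range.mp hk
    simp only [Function.comp, pvBitChar, zero_add]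
    have hcond : ((k : Int) < width) := by omega
    by_cases h : PySem.List.pyGetD pixels (k : Int) 0 ≠ 0
    · rw [if_pos h, if_pos ⟨hcond, h⟩]
    · rw [if_neg h, if_neg (by tauto)]
  · rw [List.map_map]
    rw [eq_comm, List.eq_replicate_iff]
    constructor
    · simp
    · intro b hb
      obtain ⟨j, hj, rfl⟩ := List.mem_map.mp hb
      simp only [Function.comp, pvBitChar]
      rw [if_neg]
      push_cast
      omega

-- B's 8-wide slice of the padded bit list, written out elementwise
theorem pv_slice {α : Type} (g : Nat → α) (m k : Nat) (hk : k < m) :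
    PySem.List.slice ((List.range (8*m)).map g) (some ((8*k : Nat) : Int)) (some (((8*k : Nat) : Int) + 8))
    = [g (8*k), g (8*k+1), g (8*k+2), g (8*k+3), g (8*k+4), g (8*k+5), g (8*k+6), g (8*k+7)] := by
  have hlen : ((List.range (8*m)).map g).length = 8*m := by simp
  have hs := PySem.List.slice_of_nonneg (xs := (List.range (8*m)).map g)
    (a := ((8*k : Nat) : Int)) (b := ((8*k : Nat) : Int) + 8)
    (by positivity) (by positivity) (by simp; omega) (by simp; omega)
  rw [hs]
  have h1 : (((8*k : Nat) : Int) + 8).toNat = 8*k + 8 := by omega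
  have h2 : ((8*k : Nat) : Int).toNat = 8*k := by omega
  rw [h1, h2]
  rw [← List.map_drop, List.range_eq_range', List.drop_range']
  simp only [Nat.zero_add]
  rw [show 8*k + 8 - 8*k = 8 by omega, ← List.map_take]
  rw [show 8*m - 8*k = 8 + (8*m - 8*k - 8) by omega, List.range'_append_1.symm,
      List.take_left' (by simp)]
  simp [List.range']

set_option maxHeartbeats 1000000 in
theorem pixels_to_hex_eq (pixels : List Int) (width : Int) :
    pixels_to_hex pixels width = pixels_to_hex_alt pixels width := by
  by_cases hw : 0 < width
  · have hmpos : 0 < (width.toNat + 7) / 8 := by omega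
    unfold pixels_to_hex pixels_to_hex_alt
    simp only [List.length_map, PySem.List.length_pyRange_one, sub_zero]
    rw [pv_bits_eq pixels width hw]
    simp only [List.length_map, List.length_range]
    have hm8 : PySem.List.pyRange 0 ((8 * ((width.toNat + 7) / 8) : Nat) : Int) 8
        = (List.range ((width.toNat + 7) / 8)).map (fun (k : Nat) => (0:Int) + 8 * (k : Int)) := by
      rw [PySem.List.pyRange_of_pos _ _ (by norm_num)]
      have hpos : (0:Int) < ((8 * ((width.toNat + 7) / 8) : Nat) : Int) := by positivity
      have hc : (if (0:Int) < ((8 * ((width.toNat + 7) / 8) : Nat) : Int)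
          then ((((8 * ((width.toNat + 7) / 8) : Nat) : Int) - 0 + 8 - 1) / 8).toNat else 0)
          = (width.toNat + 7) / 8 := by
        rw [if_pos hpos]; omega
      rw [hc]
    have hmA : PySem.List.pyRange 0 width 8
        = (List.range ((width.toNat + 7) / 8)).map (fun (k : Nat) => (0:Int) + 8 * (k : Int)) := by
      rw [PySem.List.pyRange_of_pos _ _ (by norm_num)]
      have hc : (if (0:Int) < width then ((width - 0 + 8 - 1) / 8).toNat else 0)
          = (width.toNat + 7) / 8 := by
        rw [if_pos hw]; omega
      rw [hc]
    rw [hm8, hmA, List.foldl_map, List.foldl_map]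
    congr 1
    apply PySem.List.foldl_congr_mem
    intro acc k hk
    have hk' : k < (width.toNat + 7) / 8 := List.mem_range.mp hk
    have hcast : (0:Int) + 8 * (k : Int) = ((8 * k : Nat) : Int) := by push_cast; ring
    rw [hcast, pv_slice (pvBitChar pixels width) _ k hk']
    rw [pv_chunk pixels width (8 * k)]
  · unfold pixels_to_hex pixels_to_hex_alt
    have hA : PySem.List.pyRange 0 width 8 = [] := by
      rw [PySem.List.pyRange_of_pos _ _ (by norm_num : (0:Int) < 8), if_neg hw]
      simp
    have hB : PySem.List.pyRange 0 width 1 = [] := PySem.List.pyRange_one_eq_nil (by omega)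
    have h0 : PySem.List.pyRange 0 0 8 = [] := by decide
    simp [hA, hB, h0, PySem.Int.mod]

-- ===== VERDICT (by name: the statement is the Claim_ definition above) =====
theorem pixels_to_hex_spec : Claim_equal_pixels_to_hex := by
  intro pixels width _ _
  exact pixels_to_hex_eq pixels width
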